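-- pv_equiv track=rewrite | github.com/pratyakshs/graphmod-scripts | compare.py | min_index_of2
-- ===== SOURCE A (Python) =====
-- inf = float('inf')
--
-- def min_index_of2(L):
-- 	min_i, min_c, min_t = 0, inf, inf
-- 	if L[0][0] == L[1][0] and L[0][3] == L[1][3]:
-- 		return 3
--
-- 	for i, x in enumerate(L):
-- 		if x[0] < min_c:
-- 			min_c = x[0]
-- 			min_t = x[3]
-- 			min_i = i
-- 		elif x[0] == min_c:
-- 			if x[3] <= min_t:
-- 				min_t = x[3]
-- 				min_i = i
-- 	return min_i
-- ===== SOURCE B (Python) =====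
-- inf = float('inf')
--
-- def min_index_of2(L):
--     if L[0][0] == L[1][0] and L[0][3] == L[1][3]:
--         return 3
--     min_c = min(x[0] for x in L)
--     best_i, best_t = 0, inf
--     for i, x in enumerate(L):
--         if x[0] == min_c and x[3] <= best_t:
--             best_t, best_i = x[3], i
--     return best_i
-- ===== Notes on version B (the rewrite author's own statement) =====
-- stated objective: alternative
-- what changed: Replaces A's single interleaved two-key argmin loop (tracking min_c and min_t together with resets) by a global minimum of the first components computed first, followed by a filtered scan that tie-breaks on the fourth component only among rows attaining that minimum.
import Mathlib
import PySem

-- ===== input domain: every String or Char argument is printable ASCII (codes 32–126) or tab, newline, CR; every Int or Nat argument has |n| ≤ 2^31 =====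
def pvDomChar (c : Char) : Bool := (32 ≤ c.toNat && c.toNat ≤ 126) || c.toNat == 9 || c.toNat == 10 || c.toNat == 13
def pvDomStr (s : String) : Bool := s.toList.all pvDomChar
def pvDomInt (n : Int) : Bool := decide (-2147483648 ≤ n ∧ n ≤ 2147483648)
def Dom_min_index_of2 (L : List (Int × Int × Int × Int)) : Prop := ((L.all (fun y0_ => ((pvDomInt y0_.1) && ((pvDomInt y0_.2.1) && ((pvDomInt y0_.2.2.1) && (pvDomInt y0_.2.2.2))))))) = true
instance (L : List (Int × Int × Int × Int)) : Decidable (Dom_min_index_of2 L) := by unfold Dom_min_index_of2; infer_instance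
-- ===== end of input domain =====

-- B replaces A's single interleaved two-key argmin loop by a global minimum of the first
-- components followed by a filtered scan over the rows attaining it (objective: alternative).

-- ===== PORT A =====
-- `none` plays Python's `inf`: v < inf and v ≤ inf are always true, v == inf is false.
def pvLtInf (v : Int) : Option Int → Bool
  | none => true
  | some c => v < c

def pvLeInf (v : Int) : Option Int → Bool
  | none => true
  | some c => v ≤ c

-- the `for i, x in enumerate(L)` loop of A, state (min_i, min_c, min_t)
def pvALoop (i : Int) (mi : Int) (mc mt : Option Int) : List (Int × Int × Int × Int) → Int
  | [] => mi
  | x :: xs =>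
    if pvLtInf x.1 mc then pvALoop (i + 1) i (some x.1) (some x.2.2.2) xs
    else if mc = some x.1 then
      if pvLeInf x.2.2.2 mt then pvALoop (i + 1) i mc (some x.2.2.2) xs
      else pvALoop (i + 1) mi mc mt xs
    else pvALoop (i + 1) mi mc mt xs

def min_index_of2 (L : List (Int × Int × Int × Int)) : Int :=
  match L with
  | x0 :: x1 :: _ =>
    if x0.1 = x1.1 ∧ x0.2.2.2 = x1.2.2.2 then 3
    else pvALoop 0 0 none none L
  | _ => 0  -- Python raises IndexError here (len(L) < 2); excluded by Pre_

-- ===== PORT B =====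
-- min(x[0] for x in L): Python's min takes the first value then folds `min` over the rest
def pvMinFold (c : Int) (xs : List (Int × Int × Int × Int)) : Int :=
  xs.foldl (fun m x => min m x.1) c

-- B-side copy of the `v <= inf` test (best_t starts at inf = none)
def pvBLeInf (v : Int) : Option Int → Bool
  | none => true
  | some c => v ≤ c

-- the `for i, x in enumerate(L)` loop of B, state (best_i, best_t); best_t = none is inf
def pvBLoop (m : Int) (i : Int) (bi : Int) (bt : Option Int) : List (Int × Int × Int × Int) → Int
  | [] => bi
  | x :: xs =>
    if x.1 = m ∧ pvBLeInf x.2.2.2 bt then pvBLoop m (i + 1) i (some x.2.2.2) xs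
    else pvBLoop m (i + 1) bi bt xs

def min_index_of2_alt (L : List (Int × Int × Int × Int)) : Int :=
  match L with
  | [] => 0       -- Python raises IndexError here (len(L) < 2); excluded by Pre_
  | [_] => 0      -- likewise
  | x0 :: x1 :: rest =>
    if x0.1 = x1.1 ∧ x0.2.2.2 = x1.2.2.2 then 3
    else pvBLoop (pvMinFold x0.1 (x1 :: rest)) 0 0 none L

-- ===== PRECONDITION & SPEC =====
-- Pre_ excludes exactly the inputs with fewer than two rows, on which A raises IndexError.
def Pre_min_index_of2 (L : List (Int × Int × Int × Int)) : Prop := 2 ≤ L.length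
instance (L : List (Int × Int × Int × Int)) : Decidable (Pre_min_index_of2 L) := by
  unfold Pre_min_index_of2; infer_instance

def pvWitness_min_index_of2 : (List (Int × Int × Int × Int)) := [(0, 0, 0, 0), (1, 0, 0, 0)]

def Spec_min_index_of2 (L : List (Int × Int × Int × Int)) (out : Int) : Prop := out = min_index_of2_alt L
instance (L : List (Int × Int × Int × Int)) (out : Int) : Decidable (Spec_min_index_of2 L out) := by unfold Spec_min_index_of2; infer_instance

-- ===== CLAIM (what is proved, stated in full; the proofs are below) =====
def Claim_equal_min_index_of2 : Prop := ∀ (L : List (Int × Int × Int × Int)), Dom_min_index_of2 L → Pre_min_index_of2 L → Spec_min_index_of2 L (min_index_of2 L)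

-- ===== LEMMAS AND PROOFS =====

-- A's and B's inf-comparisons agree (used to transport the `x[3] <= best_t` test)
theorem pvBLeInf_eq (v : Int) (t : Option Int) : pvBLeInf v t = pvLeInf v t := by
  cases t <;> rfl

-- pvMinFold unfolds one step
theorem pvMinFold_cons (c : Int) (x : Int × Int × Int × Int) (xs : List (Int × Int × Int × Int)) :
    pvMinFold c (x :: xs) = pvMinFold (min c x.1) xs := rfl

-- pvMinFold lower-bounds every first component and its seed
theorem pvMinFold_le (xs : List (Int × Int × Int × Int)) (c : Int) :
    pvMinFold c xs ≤ c ∧ ∀ y ∈ xs, pvMinFold c xs ≤ y.1 := by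
  induction xs generalizing c with
  | nil => simp [pvMinFold]
  | cons x xs ih =>
    have h := ih (min c x.1)
    rw [pvMinFold_cons]
    refine ⟨le_trans h.1 (min_le_left _ _), ?_⟩
    intro y hy
    rcases List.mem_cons.mp hy with hy | hy
    · subst hy; exact le_trans h.1 (min_le_right _ _)
    · exact h.2 y hy

-- pvMinFold is attained: it is the seed or some first component
theorem pvMinFold_att (xs : List (Int × Int × Int × Int)) (c : Int) :
    pvMinFold c xs = c ∨ ∃ y ∈ xs, y.1 = pvMinFold c xs := by
  induction xs generalizing c with
  | nil => left; rfl
  | cons x xs ih =>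
    rw [pvMinFold_cons]
    rcases ih (min c x.1) with h | ⟨y, hy, hy1⟩
    · rcases le_total c x.1 with hc | hc
      · left; simpa [min_eq_left hc] using h
      · right; exact ⟨x, List.mem_cons_self, by simpa [min_eq_right hc] using h.symm⟩
    · right; exact ⟨y, List.mem_cons_of_mem _ hy, hy1⟩

-- if the seed is below everything, pvMinFold returns the seed
theorem pvMinFold_const (xs : List (Int × Int × Int × Int)) (c : Int)
    (h : ∀ y ∈ xs, c ≤ y.1) : pvMinFold c xs = c := by
  induction xs generalizing c with
  | nil => rfl
  | cons x xs ih =>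
    have hx : c ≤ x.1 := h x List.mem_cons_self
    have : pvMinFold (min c x.1) xs = min c x.1 :=
      ih _ (fun y hy => le_trans (min_le_left _ _) (h y (List.mem_cons_of_mem _ hy)))
    rw [pvMinFold_cons]
    simpa [min_eq_left hx] using this

-- once min_c = c0 lower-bounds the rest, A's loop is B's loop filtered at m = c0
theorem pvLoop_eq_of_le (xs : List (Int × Int × Int × Int)) :
    ∀ (i i0 : Int) (c0 : Int) (t0 : Option Int), (∀ x ∈ xs, c0 ≤ x.1) →
      pvALoop i i0 (some c0) t0 xs = pvBLoop c0 i i0 t0 xs := by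
  induction xs with
  | nil => intro i i0 c0 t0 _; rfl
  | cons x xs ih =>
    intro i i0 c0 t0 h
    have hx : c0 ≤ x.1 := h x List.mem_cons_self
    have htl : ∀ y ∈ xs, c0 ≤ y.1 := fun y hy => h y (List.mem_cons_of_mem _ hy)
    have hnlt : ¬ (x.1 < c0) := not_lt.mpr hx
    by_cases he : x.1 = c0
    · by_cases ht : pvLeInf x.2.2.2 t0 = true
      · rw [show pvALoop i i0 (some c0) t0 (x :: xs)
              = pvALoop (i + 1) i (some c0) (some x.2.2.2) xs from by
            simp [pvALoop, pvLtInf, he, ht]]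
        rw [show pvBLoop c0 i i0 t0 (x :: xs)
              = pvBLoop c0 (i + 1) i (some x.2.2.2) xs from by
            simp [pvBLoop, pvBLeInf_eq, he, ht]]
        exact ih _ _ _ _ htl
      · rw [show pvALoop i i0 (some c0) t0 (x :: xs)
              = pvALoop (i + 1) i0 (some c0) t0 xs from by
            simp [pvALoop, pvLtInf, he, ht]]
        rw [show pvBLoop c0 i i0 t0 (x :: xs)
              = pvBLoop c0 (i + 1) i0 t0 xs from by
            simp [pvBLoop, pvBLeInf_eq, ht]]
        exact ih _ _ _ _ htl
    · have hne : ¬ (c0 = x.1) := fun h' => he h'.symm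
      rw [show pvALoop i i0 (some c0) t0 (x :: xs)
            = pvALoop (i + 1) i0 (some c0) t0 xs from by
          simp [pvALoop, pvLtInf, hnlt, hne]]
      rw [show pvBLoop c0 i i0 t0 (x :: xs)
            = pvBLoop c0 (i + 1) i0 t0 xs from by
          simp [pvBLoop, he]]
      exact ih _ _ _ _ htl

-- while min_c = c0 is still above the global minimum m, A's state is irrelevant to the
-- result and B's state is still the initial (j, inf) one
theorem pvLoop_eq_of_lt (xs : List (Int × Int × Int × Int)) :
    ∀ (i i0 : Int) (c0 m : Int) (t0 : Option Int) (j : Int), m < c0 →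
      (∀ y ∈ xs, m ≤ y.1) → (∃ y ∈ xs, y.1 = m) →
      pvALoop i i0 (some c0) t0 xs = pvBLoop m i j none xs := by
  induction xs with
  | nil => intro _ _ _ _ _ _ _ _ h; exact absurd h (by simp)
  | cons x xs ih =>
    intro i i0 c0 m t0 j hm hlb hex
    have htl : ∀ y ∈ xs, m ≤ y.1 := fun y hy => hlb y (List.mem_cons_of_mem _ hy)
    by_cases he : x.1 = m
    · -- first row attaining the minimum: both loops take it, then pvLoop_eq_of_le
      have hlt : pvLtInf x.1 (some c0) = true := by simp [pvLtInf]; omega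
      rw [show pvALoop i i0 (some c0) t0 (x :: xs)
            = pvALoop (i + 1) i (some x.1) (some x.2.2.2) xs from by
          simp [pvALoop, hlt]]
      rw [show pvBLoop m i j none (x :: xs)
            = pvBLoop m (i + 1) i (some x.2.2.2) xs from by
          simp [pvBLoop, he, pvBLeInf]]
      rw [he]
      exact pvLoop_eq_of_le xs _ _ _ _ htl
    · have hex' : ∃ y ∈ xs, y.1 = m := by
        rcases hex with ⟨y, hy, hy1⟩
        rcases List.mem_cons.mp hy with hy | hy
        · subst hy; exact absurd hy1 he
        · exact ⟨y, hy, hy1⟩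
      have hm' : m < x.1 := lt_of_le_of_ne (hlb x List.mem_cons_self) (Ne.symm he)
      rw [show pvBLoop m i j none (x :: xs) = pvBLoop m (i + 1) j none xs from by
          simp [pvBLoop, he]]
      by_cases hc : x.1 < c0
      · -- A resets its state to a still-too-large key x.1 > m
        rw [show pvALoop i i0 (some c0) t0 (x :: xs)
              = pvALoop (i + 1) i (some x.1) (some x.2.2.2) xs from by
            simp [pvALoop, pvLtInf, hc]]
        exact ih _ _ _ _ _ _ hm' htl hex'
      · by_cases heq : x.1 = c0
        · by_cases ht : pvLeInf x.2.2.2 t0 = true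
          · rw [show pvALoop i i0 (some c0) t0 (x :: xs)
                  = pvALoop (i + 1) i (some c0) (some x.2.2.2) xs from by
                simp [pvALoop, pvLtInf, heq, ht]]
            exact ih _ _ _ _ _ _ hm htl hex'
          · rw [show pvALoop i i0 (some c0) t0 (x :: xs)
                  = pvALoop (i + 1) i0 (some c0) t0 xs from by
                simp [pvALoop, pvLtInf, heq, ht]]
            exact ih _ _ _ _ _ _ hm htl hex'
        · have hne : ¬ (c0 = x.1) := fun h' => heq h'.symm
          rw [show pvALoop i i0 (some c0) t0 (x :: xs)
                = pvALoop (i + 1) i0 (some c0) t0 xs from by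
              simp [pvALoop, pvLtInf, hc, hne]]
          exact ih _ _ _ _ _ _ hm htl hex'

-- ===== VERDICT (by name: the statement is the Claim_ definition above) =====
theorem min_index_of2_spec : Claim_equal_min_index_of2 := by
  intro L _ hpre
  unfold Spec_min_index_of2
  match L, hpre with
  | x0 :: x1 :: rest, _ =>
    by_cases hg : x0.1 = x1.1 ∧ x0.2.2.2 = x1.2.2.2
    · simp [min_index_of2, min_index_of2_alt, hg]
    · have hle := pvMinFold_le (x1 :: rest) x0.1
      set m := pvMinFold x0.1 (x1 :: rest) with hmdef
      simp only [min_index_of2, min_index_of2_alt, hg, if_neg, not_false_iff]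
      -- A's first iteration always takes the x[0] < inf branch
      have hfirst : pvALoop 0 0 none none (x0 :: x1 :: rest)
          = pvALoop 1 0 (some x0.1) (some x0.2.2.2) (x1 :: rest) := by
        simp [pvALoop, pvLtInf]
      rw [hfirst]
      by_cases hall : ∀ y ∈ x1 :: rest, x0.1 ≤ y.1
      · -- the head attains the minimum: B takes it too, then the loops run in step
        have hm0 : m = x0.1 := pvMinFold_const _ _ hall
        have : pvBLoop m 0 0 none (x0 :: x1 :: rest)
            = pvBLoop m 1 0 (some x0.2.2.2) (x1 :: rest) := by
          simp [pvBLoop, pvBLeInf, hm0]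
        rw [this, hm0]
        exact pvLoop_eq_of_le _ _ _ _ _ hall
      · -- the minimum lies strictly below the head, in the tail
        rw [not_forall] at hall
        simp only [not_forall, not_le, exists_prop] at hall
        rcases hall with ⟨y, hy, hy1⟩
        have hmlt : m < x0.1 := lt_of_le_of_lt (hle.2 y hy) hy1
        have hex : ∃ y ∈ x1 :: rest, y.1 = m := by
          rcases pvMinFold_att (x1 :: rest) x0.1 with h | h
          · exact absurd (h ▸ hmlt) (lt_irrefl _)
          · exact h
        have : pvBLoop m 0 0 none (x0 :: x1 :: rest) = pvBLoop m 1 0 none (x1 :: rest) := by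
          have : ¬ (x0.1 = m ∧ pvBLeInf x0.2.2.2 none = true) := fun h' =>
            absurd (h'.1 ▸ hmlt) (lt_irrefl _)
          simp [pvBLoop, this]
        rw [this]
        exact pvLoop_eq_of_lt _ _ _ _ _ _ _ hmlt hle.2 hex
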